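-- pv_equiv track=rewrite | github.com/AmZaDin14/sijaku | sijaku/utils.py | find_optimal_interval
-- ===== SOURCE A (Python) =====
-- import math
--
-- def find_divisors(n: int):
--     """Mencari semua faktor pembagi dari sebuah angka n."""
--     divs = set()
--     for i in range(1, int(math.sqrt(n)) + 1):
--         if n % i == 0:
--             divs.add(i)
--             divs.add(n // i)
--     return sorted(list(divs))
--
-- def find_optimal_interval(sks_duration_in_minutes: int):
--     """Menentukan interval menit yang paling cocok secara otomatis."""
--     if sks_duration_in_minutes <= 0:
--         raise ValueError("Durasi SKS harus positif.")
--     divisors = find_divisors(sks_duration_in_minutes)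
--     preferred_intervals = [5, 10, 15]
--     for p_interval in preferred_intervals:
--         if p_interval in divisors:
--             return p_interval
--
--     MAX_REASONABLE_INTERVAL = 15
--     reasonable_divisors = [d for d in divisors if 1 < d < sks_duration_in_minutes]
--     if not reasonable_divisors:
--         return 1
--
--     best_fallback = max(
--         [d for d in reasonable_divisors if d <= MAX_REASONABLE_INTERVAL] or [0]
--     )
--     if best_fallback > 0:
--         return best_fallback
--     else:
--         return min(reasonable_divisors)
-- ===== SOURCE B (Python) =====
-- import math
--
-- def find_optimal_interval(sks_duration_in_minutes: int):
--     """Same result as A, without building/sorting the divisor list."""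
--     n = sks_duration_in_minutes
--     if n <= 0:
--         raise ValueError("Durasi SKS harus positif.")
--     if n % 5 == 0:
--         return 5
--     for d in range(15, 1, -1):
--         if n % d == 0 and d < n:
--             return d
--     for i in range(2, math.isqrt(n) + 1):
--         if n % i == 0:
--             return i
--     return 1
-- ===== Notes on version B (the rewrite author's own statement) =====
-- stated objective: alternative
-- what changed: Instead of enumerating all divisors via a sqrt loop, deduplicating into a set and sorting, B returns 5 immediately when 5 divides n, otherwise scans 15..2 for the largest small proper divisor, and only falls back to trial division up to isqrt(n) for the smallest proper divisor; no divisor list is ever built.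
import Mathlib
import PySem

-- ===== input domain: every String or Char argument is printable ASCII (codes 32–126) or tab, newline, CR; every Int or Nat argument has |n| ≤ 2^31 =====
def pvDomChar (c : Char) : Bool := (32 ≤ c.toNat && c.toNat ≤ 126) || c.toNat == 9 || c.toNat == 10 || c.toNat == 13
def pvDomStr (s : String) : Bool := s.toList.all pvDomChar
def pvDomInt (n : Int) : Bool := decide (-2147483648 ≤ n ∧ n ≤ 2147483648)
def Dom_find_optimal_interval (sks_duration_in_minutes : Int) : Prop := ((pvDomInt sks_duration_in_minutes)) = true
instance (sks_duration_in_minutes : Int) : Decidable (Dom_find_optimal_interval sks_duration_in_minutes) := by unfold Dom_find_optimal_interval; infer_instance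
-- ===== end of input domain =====

-- B computes the same interval without building and sorting the full divisor list:
-- it tests 5, scans 15..2 for the largest small divisor, then trial-divides up to
-- isqrt(n) for the smallest proper divisor (alternative decomposition, no list built).


-- ===== PORT A =====
-- int(math.sqrt(n)) is ported as Nat.sqrt n.toNat: exact for 0 ≤ n ≤ 2^31 (the double
-- sqrt is correctly rounded there, so truncation agrees with the integer square root).
def find_divisors (n : Int) : List Int :=
  let divs :=
    (PySem.List.pyRange 1 (Int.ofNat (Nat.sqrt n.toNat) + 1) 1).foldl
      (fun s i =>
        if PySem.Int.mod n i == 0 then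
          PySem.Set.add (PySem.Set.add s i) (PySem.Int.floordiv n i)
        else s)
      PySem.Set.empty
  PySem.List.sorted divs (fun x => x) false

-- raise ValueError → arbitrary value 0; those inputs are outside Pre_.
def find_optimal_interval (sks_duration_in_minutes : Int) : Int :=
  if sks_duration_in_minutes ≤ 0 then 0
  else
    let divisors := find_divisors sks_duration_in_minutes
    match ([5, 10, 15] : List Int).find? (fun p => divisors.contains p) with
    | some p => p
    | none =>
      let reasonable := divisors.filter
        (fun d => decide (1 < d) && decide (d < sks_duration_in_minutes))
      if reasonable.isEmpty then 1
      else
        let capped := reasonable.filter (fun d => decide (d ≤ 15))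
        let pool := if capped.isEmpty then ([0] : List Int) else capped
        match PySem.List.max? pool (fun x => x) with
        | none => 0
        | some best =>
          if best > 0 then best
          else
            match PySem.List.min? reasonable (fun x => x) with
            | none => 0
            | some m => m

-- ===== PORT B =====
-- math.isqrt(n) is Nat.sqrt n.toNat; each 'for … if …: return' loop is find? over its range.
-- raise ValueError → arbitrary value 0; those inputs are outside Pre_.
def find_optimal_interval_alt (sks_duration_in_minutes : Int) : Int :=
  if sks_duration_in_minutes ≤ 0 then 0
  else if PySem.Int.mod sks_duration_in_minutes 5 == 0 then 5
  else
    match (PySem.List.pyRange 15 1 (-1)).find?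
        (fun d => PySem.Int.mod sks_duration_in_minutes d == 0
                  && decide (d < sks_duration_in_minutes)) with
    | some d => d
    | none =>
      match (PySem.List.pyRange 2 (Int.ofNat (Nat.sqrt sks_duration_in_minutes.toNat) + 1) 1).find?
          (fun i => PySem.Int.mod sks_duration_in_minutes i == 0) with
      | some i => i
      | none => 1

-- ===== PRECONDITION & SPEC =====
-- A raises ValueError exactly when sks_duration_in_minutes ≤ 0; those inputs are excluded.
def Pre_find_optimal_interval (sks_duration_in_minutes : Int) : Prop :=
  1 ≤ sks_duration_in_minutes
instance (sks_duration_in_minutes : Int) : Decidable (Pre_find_optimal_interval sks_duration_in_minutes) := by unfold Pre_find_optimal_interval; infer_instance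
def pvWitness_find_optimal_interval : Int := 12

def Spec_find_optimal_interval (sks_duration_in_minutes : Int) (out : Int) : Prop := out = find_optimal_interval_alt sks_duration_in_minutes
instance (sks_duration_in_minutes : Int) (out : Int) : Decidable (Spec_find_optimal_interval sks_duration_in_minutes out) := by unfold Spec_find_optimal_interval; infer_instance

-- ===== CLAIM (what is proved, stated in full; the proofs are below) =====
def Claim_equal_find_optimal_interval : Prop := ∀ (sks_duration_in_minutes : Int), Dom_find_optimal_interval sks_duration_in_minutes → Pre_find_optimal_interval sks_duration_in_minutes → Spec_find_optimal_interval sks_duration_in_minutes (find_optimal_interval sks_duration_in_minutes)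

-- ===== LEMMAS AND PROOFS =====

lemma pv_sq_bounds (n : Int) (hn : 1 ≤ n) :
    (0:Int) ≤ Int.ofNat (Nat.sqrt n.toNat) ∧
    Int.ofNat (Nat.sqrt n.toNat) * Int.ofNat (Nat.sqrt n.toNat) ≤ n ∧
    n < (Int.ofNat (Nat.sqrt n.toNat) + 1) * (Int.ofNat (Nat.sqrt n.toNat) + 1) := by
  have h1 := Nat.sqrt_le' n.toNat
  have h2 := Nat.lt_succ_sqrt' n.toNat
  rw [pow_two] at h1 h2
  have hnn : ((n.toNat : Int)) = n := Int.toNat_of_nonneg (by omega)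
  have h1' : ((n.toNat.sqrt : ℤ)) * (n.toNat.sqrt : ℤ) ≤ n := by rw [← hnn]; exact_mod_cast h1
  have h2' : n < ((n.toNat.sqrt : ℤ) + 1) * ((n.toNat.sqrt : ℤ) + 1) := by
    have hc : ((n.toNat : ℕ) : ℤ) < ((n.toNat.sqrt.succ * n.toNat.sqrt.succ : ℕ) : ℤ) := by
      exact_mod_cast h2
    push_cast at hc
    rw [hnn] at hc
    linarith
  simp only [Int.ofNat_eq_natCast]
  exact ⟨by positivity, h1', h2'⟩

lemma pv_find?_first {d : Int} {R : Int → Int → Prop} {p : Int → Bool} :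
    ∀ {l : List Int}, l.Pairwise R → l.find? p = some d →
      ∀ x ∈ l, p x = true → (x = d ∨ R d x) := by
  intro l
  induction l with
  | nil => intro _ h; simp [List.find?] at h
  | cons a t ih =>
    intro hp hf x hx hpx
    rcases List.pairwise_cons.mp hp with ⟨ha, ht⟩
    by_cases hpa : p a = true
    · rw [List.find?_cons_of_pos hpa] at hf
      cases hf
      rcases List.mem_cons.mp hx with rfl | hx
      · left; rfl
      · right; exact ha _ hx
    · rw [List.find?_cons_of_neg (by simpa using hpa)] at hf
      rcases List.mem_cons.mp hx with rfl | hx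
      · exact absurd hpx hpa
      · exact ih ht hf x hx hpx

lemma pv_mem_divfold (n d : Int) :
    ∀ (l : List Int) (s : PySem.Set Int),
      d ∈ l.foldl
        (fun s i =>
          if PySem.Int.mod n i == 0 then
            PySem.Set.add (PySem.Set.add s i) (PySem.Int.floordiv n i)
          else s) s
      ↔ d ∈ s ∨ ∃ i ∈ l, PySem.Int.mod n i = 0 ∧ (d = i ∨ d = PySem.Int.floordiv n i) := by
  intro l
  induction l with
  | nil => simp
  | cons a t ih =>
    intro s
    rw [List.foldl_cons]
    by_cases ha : PySem.Int.mod n a = 0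
    · rw [if_pos (by simpa using ha), ih]
      rw [PySem.Set.mem_add, PySem.Set.mem_add]
      constructor
      · rintro (((h | rfl) | rfl) | ⟨i, hi, hm, hd⟩)
        · exact Or.inl h
        · exact Or.inr ⟨d, List.mem_cons_self, ha, Or.inl rfl⟩
        · exact Or.inr ⟨a, List.mem_cons_self, ha, Or.inr rfl⟩
        · exact Or.inr ⟨i, List.mem_cons_of_mem _ hi, hm, hd⟩
      · rintro (h | ⟨i, hi, hm, hd⟩)
        · exact Or.inl (Or.inl (Or.inl h))
        · rcases List.mem_cons.mp hi with rfl | hi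
          · rcases hd with rfl | rfl
            · exact Or.inl (Or.inl (Or.inr rfl))
            · exact Or.inl (Or.inr rfl)
          · exact Or.inr ⟨i, hi, hm, hd⟩
    · rw [if_neg (by simpa using ha), ih]
      constructor
      · rintro (h | ⟨i, hi, hm, hd⟩)
        · exact Or.inl h
        · exact Or.inr ⟨i, List.mem_cons_of_mem _ hi, hm, hd⟩
      · rintro (h | ⟨i, hi, hm, hd⟩)
        · exact Or.inl h
        · rcases List.mem_cons.mp hi with rfl | hi
          · exact absurd hm ha
          · exact Or.inr ⟨i, hi, hm, hd⟩

lemma pv_mem_find_divisors (n : Int) (hn : 1 ≤ n) (d : Int) :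
    d ∈ find_divisors n ↔ 1 ≤ d ∧ d ∣ n := by
  obtain ⟨hs0, hs1, hs2⟩ := pv_sq_bounds n hn
  unfold find_divisors
  rw [PySem.List.mem_sorted, pv_mem_divfold]
  simp only [PySem.Set.empty, List.not_mem_nil, false_or, PySem.List.mem_pyRange_one]
  constructor
  · rintro ⟨i, ⟨hi1, hi2⟩, hmod, hd⟩
    have hdvd : i ∣ n := (PySem.Int.mod_eq_zero_iff_dvd n i).mp hmod
    have heq : i * (n / i) = n := Int.mul_ediv_cancel' hdvd
    have hq1 : 1 ≤ n / i := by nlinarith [hs1]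
    rcases hd with rfl | rfl
    · exact ⟨hi1, hdvd⟩
    · rw [PySem.Int.floordiv_eq_ediv_of_pos (by omega)]
      exact ⟨hq1, Dvd.intro_left _ heq⟩
  · rintro ⟨hd1, hdvd⟩
    have hdn : d ≤ n := Int.le_of_dvd (by omega) hdvd
    by_cases hsm : d ≤ Int.ofNat (Nat.sqrt n.toNat)
    · exact ⟨d, ⟨hd1, by omega⟩, (PySem.Int.mod_eq_zero_iff_dvd n d).mpr hdvd, Or.inl rfl⟩
    · push_neg at hsm
      refine ⟨n / d, ⟨?_, ?_⟩, ?_, Or.inr ?_⟩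
      · have heq : d * (n / d) = n := Int.mul_ediv_cancel' hdvd
        nlinarith
      · -- n / d ≤ sqrt
        have heq : d * (n / d) = n := Int.mul_ediv_cancel' hdvd
        by_contra hgt
        push_neg at hgt
        nlinarith
      · have heq : d * (n / d) = n := Int.mul_ediv_cancel' hdvd
        exact (PySem.Int.mod_eq_zero_iff_dvd n (n / d)).mpr (Dvd.intro_left _ heq)
      · have heq : d * (n / d) = n := Int.mul_ediv_cancel' hdvd
        have hq1 : 1 ≤ n / d := by nlinarith
        rw [PySem.Int.floordiv_eq_ediv_of_pos (by omega)]
        set e := n / d with he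
        have h3 : n / e = d := by
          rw [← heq]
          exact Int.mul_ediv_cancel _ (by omega)
        omega

lemma pv_cofactor (n x : Int) (hx : x ∣ n) (h1 : 1 < x) (h2 : x < n) :
    (n / x) ∣ n ∧ 1 < n / x ∧ n / x < n ∧ x * (n / x) = n := by
  have heq : x * (n / x) = n := Int.mul_ediv_cancel' hx
  have he1 : 1 ≤ n / x := by nlinarith
  have hne : n / x ≠ 1 := by intro h; rw [h, mul_one] at heq; omega
  have hlt : n / x < n := by nlinarith
  exact ⟨Dvd.intro_left _ heq, by omega, hlt, heq⟩

lemma pv_le_sqrt (n x : Int) (hn : 1 ≤ n) (hx1 : 1 ≤ x) (hxx : x * x ≤ n) :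
    x ≤ Int.ofNat (Nat.sqrt n.toNat) := by
  obtain ⟨hs0, hs1, hs2⟩ := pv_sq_bounds n hn
  by_contra hgt
  push_neg at hgt
  nlinarith

lemma pv_main_equiv (n : Int) (hn : 1 ≤ n) :
    find_optimal_interval n = find_optimal_interval_alt n := by
  have hmem := pv_mem_find_divisors n hn
  obtain ⟨hs0, hs1, hs2⟩ := pv_sq_bounds n hn
  simp only [find_optimal_interval, find_optimal_interval_alt]
  have hpos : ¬ (n ≤ 0) := by omega
  rw [if_neg hpos, if_neg hpos]
  by_cases h5 : (5:Int) ∣ n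
  · have hc : ((fun p => (find_divisors n).contains p) (5:Int)) = true := by
      simp only [List.contains_iff_mem]
      exact (hmem 5).mpr ⟨by norm_num, h5⟩
    rw [List.find?_cons_of_pos hc]
    have hm5 : (PySem.Int.mod n 5 == 0) = true := by
      simpa using (PySem.Int.mod_eq_zero_iff_dvd n 5).mpr h5
    rw [hm5]
    rfl
  · have h10 : ¬ (10:Int) ∣ n := fun h => h5 (dvd_trans (by norm_num) h)
    have h15 : ¬ (15:Int) ∣ n := fun h => h5 (dvd_trans (by norm_num) h)
    have hc5 : ¬ ((fun p => (find_divisors n).contains p) (5:Int)) = true := by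
      simp only [List.contains_iff_mem, hmem]; simp [h5]
    have hc10 : ¬ ((fun p => (find_divisors n).contains p) (10:Int)) = true := by
      simp only [List.contains_iff_mem, hmem]; simp [h10]
    have hc15 : ¬ ((fun p => (find_divisors n).contains p) (15:Int)) = true := by
      simp only [List.contains_iff_mem, hmem]; simp [h15]
    rw [List.find?_cons_of_neg hc5, List.find?_cons_of_neg hc10,
        List.find?_cons_of_neg hc15]
    have hm5 : (PySem.Int.mod n 5 == 0) = false := by
      simpa using fun h => h5 ((PySem.Int.mod_eq_zero_iff_dvd n 5).mp h)
    rw [hm5]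
    simp only [List.find?_nil, Bool.false_eq_true, if_false]
    set reas := (find_divisors n).filter (fun d => decide (1 < d) && decide (d < n))
      with hreasdef
    set capped := reas.filter (fun d => decide (d ≤ 15)) with hcappeddef
    have hmem_reas : ∀ x : Int, x ∈ reas ↔ (1 < x ∧ x < n ∧ x ∣ n) := by
      intro x
      rw [hreasdef, List.mem_filter, hmem, Bool.and_eq_true]
      constructor
      · rintro ⟨⟨_, hdv⟩, hu, hv⟩
        exact ⟨by simpa using hu, by simpa using hv, hdv⟩
      · rintro ⟨h1, h2, h3⟩
        exact ⟨⟨by omega, h3⟩, by simpa using h1, by simpa using h2⟩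
    have hmem_cap : ∀ x : Int, x ∈ capped ↔ (1 < x ∧ x < n ∧ x ∣ n ∧ x ≤ 15) := by
      intro x
      rw [hcappeddef, List.mem_filter, hmem_reas]
      constructor
      · rintro ⟨⟨h1, h2, h3⟩, hv⟩
        exact ⟨h1, h2, h3, by simpa using hv⟩
      · rintro ⟨h1, h2, h3, h4⟩
        exact ⟨⟨h1, h2, h3⟩, by simpa using h4⟩
    cases hB : (PySem.List.pyRange 15 1 (-1)).find?
        (fun d => PySem.Int.mod n d == 0 && decide (d < n)) with
    | some d =>
      have hd_range : 1 < d ∧ d ≤ 15 :=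
        (PySem.List.mem_pyRange_neg_one).mp (List.mem_of_find?_eq_some hB)
      have hd_p := List.find?_some hB
      rw [Bool.and_eq_true] at hd_p
      have hd_dvd : d ∣ n := (PySem.Int.mod_eq_zero_iff_dvd n d).mp (by simpa using hd_p.1)
      have hd_lt : d < n := by simpa using hd_p.2
      have hmax := pv_find?_first (R := (· > ·)) (by decide) hB
      have hd_cap : d ∈ capped := (hmem_cap d).mpr ⟨hd_range.1, hd_lt, hd_dvd, hd_range.2⟩
      have hd_reas : d ∈ reas := (hmem_reas d).mpr ⟨hd_range.1, hd_lt, hd_dvd⟩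
      rw [if_neg (show ¬ (reas.isEmpty = true) by
        simp only [List.isEmpty_iff]; exact fun h => by simp [h] at hd_reas)]
      rw [if_neg (show ¬ (capped.isEmpty = true) by
        simp only [List.isEmpty_iff]; exact fun h => by simp [h] at hd_cap)]
      cases hmx : PySem.List.max? capped (fun x => x) with
      | none =>
        rw [PySem.List.max?_eq_none_iff] at hmx
        simp [hmx] at hd_cap
      | some b =>
        obtain ⟨hb1, hb2, hb_dvd, hb3⟩ := (hmem_cap b).mp (PySem.List.max?_mem hmx)
        have hb_le_d : b ≤ d := by
          have hbmem : b ∈ PySem.List.pyRange 15 1 (-1) :=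
            (PySem.List.mem_pyRange_neg_one).mpr ⟨hb1, hb3⟩
          have := hmax b hbmem (by
            rw [Bool.and_eq_true]
            exact ⟨by simpa using (PySem.Int.mod_eq_zero_iff_dvd n b).mpr hb_dvd,
                   by simpa using hb2⟩)
          rcases this with rfl | h
          · exact le_refl _
          · omega
        have hd_le_b : d ≤ b := PySem.List.max?_isMax hmx d hd_cap
        show (if b > 0 then b
              else match PySem.List.min? reas (fun x => x) with
                   | none => 0 | some m => m) = d
        rw [if_pos (by omega : b > 0)]
        omega
    | none =>
      have hnone := List.find?_eq_none.mp hB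
      have hsmall : ∀ x : Int, 1 < x → x ≤ 15 → x ∣ n → x < n → False := by
        intro x hx1 hx15 hxd hxn
        exact hnone x ((PySem.List.mem_pyRange_neg_one).mpr ⟨hx1, hx15⟩) (by
          rw [Bool.and_eq_true]
          exact ⟨by simpa using (PySem.Int.mod_eq_zero_iff_dvd n x).mpr hxd, by simpa using hxn⟩)
      cases hB2 : (PySem.List.pyRange 2 (Int.ofNat (Nat.sqrt n.toNat) + 1) 1).find?
          (fun i => PySem.Int.mod n i == 0) with
      | some i =>
        have hi_range : 2 ≤ i ∧ i < Int.ofNat (Nat.sqrt n.toNat) + 1 :=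
          (PySem.List.mem_pyRange_one).mp (List.mem_of_find?_eq_some hB2)
        have hi_dvd : i ∣ n := (PySem.Int.mod_eq_zero_iff_dvd n i).mp
          (by simpa using List.find?_some hB2)
        have hi_lt_n : i < n := by nlinarith [hi_range.1, hi_range.2, hs1]
        have hi_reas : i ∈ reas := (hmem_reas i).mpr ⟨by omega, hi_lt_n, hi_dvd⟩
        rw [if_neg (show ¬ (reas.isEmpty = true) by
          simp only [List.isEmpty_iff]; exact fun h => by simp [h] at hi_reas)]
        have hcap : capped = [] := by
          rw [List.eq_nil_iff_forall_not_mem]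
          intro x hx
          obtain ⟨hx1, hx2, hx3, hx4⟩ := (hmem_cap x).mp hx
          exact hsmall x hx1 hx4 hx3 hx2
        rw [if_pos (show capped.isEmpty = true by simp [hcap])]
        have hmax0 : PySem.List.max? ([0] : List Int) (fun x => x) = some 0 := by decide
        rw [hmax0]
        show (if (0:Int) > 0 then (0:Int)
              else match PySem.List.min? reas (fun x => x) with
                   | none => 0 | some m => m) = i
        rw [if_neg (by omega : ¬ ((0:Int) > 0))]
        cases hmin : PySem.List.min? reas (fun x => x) with
        | none =>
          rw [PySem.List.min?_eq_none_iff] at hmin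
          simp [hmin] at hi_reas
        | some m =>
          obtain ⟨hm1, hm2, hm_dvd⟩ := (hmem_reas m).mp (PySem.List.min?_mem hmin)
          have hm_le_i : m ≤ i := PySem.List.min?_isMin hmin i hi_reas
          obtain ⟨he_dvd, he1, he2, heq⟩ := pv_cofactor n m hm_dvd hm1 hm2
          have he_reas : n / m ∈ reas := (hmem_reas _).mpr ⟨he1, he2, he_dvd⟩
          have hm_le_e : m ≤ n / m := PySem.List.min?_isMin hmin _ he_reas
          have hm_sqrt : m ≤ Int.ofNat (Nat.sqrt n.toNat) := by
            apply pv_le_sqrt n m hn (by omega)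
            nlinarith
          have hi_le_m : i ≤ m := by
            have := pv_find?_first (R := (· < ·))
              (PySem.List.pairwise_lt_pyRange_one 2 (Int.ofNat (Nat.sqrt n.toNat) + 1)) hB2 m
              ((PySem.List.mem_pyRange_one).mpr ⟨by omega, by omega⟩)
              (by simpa using (PySem.Int.mod_eq_zero_iff_dvd n m).mpr hm_dvd)
            rcases this with rfl | h
            · exact le_refl _
            · omega
          show m = i
          omega
      | none =>
        have hnone2 := List.find?_eq_none.mp hB2
        have hreas : reas = [] := by
          rw [List.eq_nil_iff_forall_not_mem]
          intro x hx
          obtain ⟨hx1, hxn, hxd⟩ := (hmem_reas x).mp hx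
          obtain ⟨he_dvd, he1, he2, heq⟩ := pv_cofactor n x hxd hx1 hxn
          by_cases hxs : x ≤ Int.ofNat (Nat.sqrt n.toNat)
          · exact hnone2 x ((PySem.List.mem_pyRange_one).mpr ⟨by omega, by omega⟩)
              (by simpa using (PySem.Int.mod_eq_zero_iff_dvd n x).mpr hxd)
          · have hes : n / x ≤ Int.ofNat (Nat.sqrt n.toNat) := by
              by_contra hgt
              push_neg at hgt
              push_neg at hxs
              nlinarith
            exact hnone2 (n / x)
              ((PySem.List.mem_pyRange_one).mpr ⟨by omega, by omega⟩)
              (by simpa using (PySem.Int.mod_eq_zero_iff_dvd n (n / x)).mpr he_dvd)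
        rw [if_pos (show reas.isEmpty = true by simp [hreas])]

-- ===== VERDICT (by name: the statement is the Claim_ definition above) =====
theorem find_optimal_interval_spec : Claim_equal_find_optimal_interval := by
  intro n _ hpre
  unfold Spec_find_optimal_interval
  exact pv_main_equiv n hpre
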